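-- pv_equiv track=rewrite | github.com/ggpwnkthx/oa-pg | normalize_addresses/utils.py | normalize_region
-- ===== SOURCE A (Python) =====
-- from typing import Optional, Sequence, Tuple, List, Dict, Any
--
-- STATE_ABBREVIATIONS: Dict[str, str] = {
--     "Alabama": "AL",
--     "Alaska": "AK",
--     "Arizona": "AZ",
--     "Arkansas": "AR",
--     "California": "CA",
--     "Colorado": "CO",
--     "Connecticut": "CT",
--     "Delaware": "DE",
--     "Florida": "FL",
--     "Georgia": "GA",
--     "Hawaii": "HI",
--     "Idaho": "ID",
--     "Illinois": "IL",
--     "Indiana": "IN",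
--     "Iowa": "IA",
--     "Kansas": "KS",
--     "Kentucky": "KY",
--     "Louisiana": "LA",
--     "Maine": "ME",
--     "Maryland": "MD",
--     "Massachusetts": "MA",
--     "Michigan": "MI",
--     "Minnesota": "MN",
--     "Mississippi": "MS",
--     "Missouri": "MO",
--     "Montana": "MT",
--     "Nebraska": "NE",
--     "Nevada": "NV",
--     "New Hampshire": "NH",
--     "New Jersey": "NJ",
--     "New Mexico": "NM",
--     "New York": "NY",
--     "North Carolina": "NC",
--     "North Dakota": "ND",
--     "Ohio": "OH",
--     "Oklahoma": "OK",
--     "Oregon": "OR",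
--     "Pennsylvania": "PA",
--     "Rhode Island": "RI",
--     "South Carolina": "SC",
--     "South Dakota": "SD",
--     "Tennessee": "TN",
--     "Texas": "TX",
--     "Utah": "UT",
--     "Vermont": "VT",
--     "Virginia": "VA",
--     "Washington": "WA",
--     "West Virginia": "WV",
--     "Wisconsin": "WI",
--     "Wyoming": "WY",
--     "District of Columbia": "DC",
-- }
--
-- def normalize_region(region: Optional[str], country_code: Optional[str]) -> str:
--     """
--     Given a raw region or state name/abbreviation, return a two-letter
--     USPS state code when country_code == "US". Otherwise, return the
--     input (trimmed and upper-cased).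
--     """
--     if not region:
--         return ""
--     r = region.strip()
--     if country_code and country_code.upper() == "US":
--         title = r.title()
--         if title in STATE_ABBREVIATIONS:
--             return STATE_ABBREVIATIONS[title]
--         upper = r.upper()
--         if upper in STATE_ABBREVIATIONS.values():
--             return upper
--         for full, abbr in STATE_ABBREVIATIONS.items():
--             if full.upper() == upper:
--                 return abbr
--         return upper[:2]
--     return r.upper()
-- ===== SOURCE B (Python) =====
-- STATE_ABBREVIATIONS = {
--     "Alabama": "AL", "Alaska": "AK", "Arizona": "AZ", "Arkansas": "AR",
--     "California": "CA", "Colorado": "CO", "Connecticut": "CT", "Delaware": "DE",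
--     "Florida": "FL", "Georgia": "GA", "Hawaii": "HI", "Idaho": "ID",
--     "Illinois": "IL", "Indiana": "IN", "Iowa": "IA", "Kansas": "KS",
--     "Kentucky": "KY", "Louisiana": "LA", "Maine": "ME", "Maryland": "MD",
--     "Massachusetts": "MA", "Michigan": "MI", "Minnesota": "MN", "Mississippi": "MS",
--     "Missouri": "MO", "Montana": "MT", "Nebraska": "NE", "Nevada": "NV",
--     "New Hampshire": "NH", "New Jersey": "NJ", "New Mexico": "NM", "New York": "NY",
--     "North Carolina": "NC", "North Dakota": "ND", "Ohio": "OH", "Oklahoma": "OK",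
--     "Oregon": "OR", "Pennsylvania": "PA", "Rhode Island": "RI", "South Carolina": "SC",
--     "South Dakota": "SD", "Tennessee": "TN", "Texas": "TX", "Utah": "UT",
--     "Vermont": "VT", "Virginia": "VA", "Washington": "WA", "West Virginia": "WV",
--     "Wisconsin": "WI", "Wyoming": "WY", "District of Columbia": "DC",
-- }
--
-- # A sorted array of (uppercase key, code) pairs — both full names and the codes
-- # themselves — queried by binary search instead of dict/scan probes.
-- _PAIRS = sorted(
--     [(full.upper(), abbr) for full, abbr in STATE_ABBREVIATIONS.items()]
--     + [(abbr, abbr) for abbr in STATE_ABBREVIATIONS.values()],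
--     key=lambda p: p[0],
-- )
--
-- def normalize_region(region, country_code):
--     if not region:
--         return ""
--     r = region.strip()
--     if country_code and country_code.upper() == "US":
--         key = r.upper()
--         lo, hi = 0, len(_PAIRS)
--         while lo < hi:
--             mid = (lo + hi) // 2
--             k, code = _PAIRS[mid]
--             if k == key:
--                 return code
--             if key < k:
--                 hi = mid
--             else:
--                 lo = mid + 1
--         return key[:2]
--     return r.upper()
-- ===== Notes on version B (the rewrite author's own statement) =====
-- stated objective: alternative
-- what changed: Replaces A's three sequential probes of the state dict (title-cased key test, value-membership test, linear scan comparing upper-cased full names) with binary search over a single module-level array of (uppercase key, code) pairs, merged from both directions and sorted once at import, falling back to key[:2] on a miss.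
import Mathlib
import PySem

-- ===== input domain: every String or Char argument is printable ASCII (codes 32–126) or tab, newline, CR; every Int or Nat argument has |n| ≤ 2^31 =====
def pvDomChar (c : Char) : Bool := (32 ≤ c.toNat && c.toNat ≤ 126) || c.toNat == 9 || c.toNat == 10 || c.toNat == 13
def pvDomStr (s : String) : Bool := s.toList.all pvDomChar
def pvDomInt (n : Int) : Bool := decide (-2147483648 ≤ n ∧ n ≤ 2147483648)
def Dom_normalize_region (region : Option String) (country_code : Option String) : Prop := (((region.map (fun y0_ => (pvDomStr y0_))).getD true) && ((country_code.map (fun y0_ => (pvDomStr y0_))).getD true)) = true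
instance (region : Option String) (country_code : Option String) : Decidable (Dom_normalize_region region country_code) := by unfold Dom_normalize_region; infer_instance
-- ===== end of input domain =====

-- B replaces A's three sequential probes of the state table (title-key test, value
-- membership, linear scan of upper-cased names) by binary search in one sorted array of
-- (uppercase key, code) pairs built once at module level (objective: alternative).

-- ===== PORT A =====
def stateTable : List (String × String) := [
  ("Alabama", "AL"), ("Alaska", "AK"), ("Arizona", "AZ"), ("Arkansas", "AR"),
  ("California", "CA"), ("Colorado", "CO"), ("Connecticut", "CT"), ("Delaware", "DE"),
  ("Florida", "FL"), ("Georgia", "GA"), ("Hawaii", "HI"), ("Idaho", "ID"),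
  ("Illinois", "IL"), ("Indiana", "IN"), ("Iowa", "IA"), ("Kansas", "KS"),
  ("Kentucky", "KY"), ("Louisiana", "LA"), ("Maine", "ME"), ("Maryland", "MD"),
  ("Massachusetts", "MA"), ("Michigan", "MI"), ("Minnesota", "MN"), ("Mississippi", "MS"),
  ("Missouri", "MO"), ("Montana", "MT"), ("Nebraska", "NE"), ("Nevada", "NV"),
  ("New Hampshire", "NH"), ("New Jersey", "NJ"), ("New Mexico", "NM"), ("New York", "NY"),
  ("North Carolina", "NC"), ("North Dakota", "ND"), ("Ohio", "OH"), ("Oklahoma", "OK"),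
  ("Oregon", "OR"), ("Pennsylvania", "PA"), ("Rhode Island", "RI"), ("South Carolina", "SC"),
  ("South Dakota", "SD"), ("Tennessee", "TN"), ("Texas", "TX"), ("Utah", "UT"),
  ("Vermont", "VT"), ("Virginia", "VA"), ("Washington", "WA"), ("West Virginia", "WV"),
  ("Wisconsin", "WI"), ("Wyoming", "WY"), ("District of Columbia", "DC")]

def STATE_ABBREVIATIONS : PySem.Dict String String := PySem.Dict.ofList stateTable

-- str.title(), hand-ported (PySem has no title): exact on the ASCII domain, where
-- 'cased character' coincides with isalpha; an alphabetic char is uppercased after a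
-- non-alphabetic char and lowercased otherwise.
def pyTitleGo : List Char → Bool → List Char
  | [], _ => []
  | c :: rest, prevAlpha =>
    (if PySem.Chars.isalpha c then
       (if prevAlpha then PySem.Chars.lowerChar c else PySem.Chars.upperChar c)
     else c) :: pyTitleGo rest (PySem.Chars.isalpha c)

def pyTitle (s : String) : String := String.ofList (pyTitleGo s.toList false)

-- A's 'for full, abbr in STATE_ABBREVIATIONS.items(): if full.upper() == upper: return abbr'
def scanStates : List (String × String) → String → Option String
  | [], _ => none
  | (full, abbr) :: rest, u =>
    if PySem.Str.upper full = u then some abbr else scanStates rest u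

def normalize_region (region : Option String) (country_code : Option String) : String :=
  match region with
  | none => ""
  | some s =>
    if s = "" then ""
    else
      let r := PySem.Str.strip s
      let isUS : Bool := match country_code with
        | none => false
        | some cc => if cc = "" then false else PySem.Str.upper cc = "US"
      if isUS then
        let title := pyTitle r
        if STATE_ABBREVIATIONS.contains title then
          (STATE_ABBREVIATIONS.get? title).getD ""   -- guarded by the contains test
        else
          let upper := PySem.Str.upper r
          if upper ∈ STATE_ABBREVIATIONS.values then upper
          else
            match scanStates STATE_ABBREVIATIONS.items upper with
            | some abbr => abbr
            | none => PySem.Str.slice upper none (some 2)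
      else PySem.Str.upper r

-- ===== PORT B =====
-- module-level: the merged (uppercase key, code) pairs, sorted by key
-- (Python's string '<' is codepoint-lexicographic = List Char '<' on .toList)
def mergedPairs : List (String × String) :=
  stateTable.map (fun p => (PySem.Str.upper p.1, p.2)) ++
  stateTable.map (fun p => (p.2, p.2))

def sortedPairs : List (String × String) :=
  PySem.List.sorted mergedPairs (fun p => p.1.toList) false

-- the while-loop: lo/hi binary search; _PAIRS[mid] is always in range (lo < hi ≤ len).
-- Structural recursion on a fuel of hi - lo steps (the window shrinks by at least one
-- per iteration, so this fuel is never exhausted before the loop's own exit test).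
def bsearchGo (L : List (String × String)) (key : String) : Nat → Nat → Nat → Option String
  | 0, _, _ => none
  | fuel + 1, lo, hi =>
    if lo < hi then
      let p := L.getD ((lo + hi) / 2) ("", "")
      if p.1 = key then some p.2
      else if PySem.Chars.strLt key.toList p.1.toList then bsearchGo L key fuel lo ((lo + hi) / 2)
      else bsearchGo L key fuel ((lo + hi) / 2 + 1) hi
    else none

def bsearch (L : List (String × String)) (key : String) (lo hi : Nat) : Option String :=
  bsearchGo L key (hi - lo) lo hi

def normalize_region_alt (region : Option String) (country_code : Option String) : String :=
  match region with
  | none => ""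
  | some s =>
    if s = "" then ""
    else
      let r := PySem.Str.strip s
      let isUS : Bool := match country_code with
        | none => false
        | some cc => if cc = "" then false else PySem.Str.upper cc = "US"
      if isUS then
        let key := PySem.Str.upper r
        match bsearch sortedPairs key 0 sortedPairs.length with
        | some code => code
        | none => PySem.Str.slice key none (some 2)
      else PySem.Str.upper r

-- ===== PRECONDITION & SPEC =====
def Spec_normalize_region (region : Option String) (country_code : Option String) (out : String) : Prop := out = normalize_region_alt region country_code
instance (region : Option String) (country_code : Option String) (out : String) : Decidable (Spec_normalize_region region country_code out) := by unfold Spec_normalize_region; infer_instance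

-- ===== CLAIM (what is proved, stated in full; the proofs are below) =====
def Claim_equal_normalize_region : Prop := ∀ (region : Option String) (country_code : Option String), Dom_normalize_region region country_code → Spec_normalize_region region country_code (normalize_region region country_code)

-- ===== LEMMAS AND PROOFS =====

-- the concrete value of the module-level sorted array, named once so each fact below
-- is decided on the literal instead of re-evaluating the sort
def LSORT : List (String × String) := [
  ("AK", "AK"), ("AL", "AL"), ("ALABAMA", "AL"),
  ("ALASKA", "AK"), ("AR", "AR"), ("ARIZONA", "AZ"),
  ("ARKANSAS", "AR"), ("AZ", "AZ"), ("CA", "CA"),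
  ("CALIFORNIA", "CA"), ("CO", "CO"), ("COLORADO", "CO"),
  ("CONNECTICUT", "CT"), ("CT", "CT"), ("DC", "DC"),
  ("DE", "DE"), ("DELAWARE", "DE"), ("DISTRICT OF COLUMBIA", "DC"),
  ("FL", "FL"), ("FLORIDA", "FL"), ("GA", "GA"),
  ("GEORGIA", "GA"), ("HAWAII", "HI"), ("HI", "HI"),
  ("IA", "IA"), ("ID", "ID"), ("IDAHO", "ID"),
  ("IL", "IL"), ("ILLINOIS", "IL"), ("IN", "IN"),
  ("INDIANA", "IN"), ("IOWA", "IA"), ("KANSAS", "KS"),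
  ("KENTUCKY", "KY"), ("KS", "KS"), ("KY", "KY"),
  ("LA", "LA"), ("LOUISIANA", "LA"), ("MA", "MA"),
  ("MAINE", "ME"), ("MARYLAND", "MD"), ("MASSACHUSETTS", "MA"),
  ("MD", "MD"), ("ME", "ME"), ("MI", "MI"),
  ("MICHIGAN", "MI"), ("MINNESOTA", "MN"), ("MISSISSIPPI", "MS"),
  ("MISSOURI", "MO"), ("MN", "MN"), ("MO", "MO"),
  ("MONTANA", "MT"), ("MS", "MS"), ("MT", "MT"),
  ("NC", "NC"), ("ND", "ND"), ("NE", "NE"),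
  ("NEBRASKA", "NE"), ("NEVADA", "NV"), ("NEW HAMPSHIRE", "NH"),
  ("NEW JERSEY", "NJ"), ("NEW MEXICO", "NM"), ("NEW YORK", "NY"),
  ("NH", "NH"), ("NJ", "NJ"), ("NM", "NM"),
  ("NORTH CAROLINA", "NC"), ("NORTH DAKOTA", "ND"), ("NV", "NV"),
  ("NY", "NY"), ("OH", "OH"), ("OHIO", "OH"),
  ("OK", "OK"), ("OKLAHOMA", "OK"), ("OR", "OR"),
  ("OREGON", "OR"), ("PA", "PA"), ("PENNSYLVANIA", "PA"),
  ("RHODE ISLAND", "RI"), ("RI", "RI"), ("SC", "SC"),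
  ("SD", "SD"), ("SOUTH CAROLINA", "SC"), ("SOUTH DAKOTA", "SD"),
  ("TENNESSEE", "TN"), ("TEXAS", "TX"), ("TN", "TN"),
  ("TX", "TX"), ("UT", "UT"), ("UTAH", "UT"),
  ("VA", "VA"), ("VERMONT", "VT"), ("VIRGINIA", "VA"),
  ("VT", "VT"), ("WA", "WA"), ("WASHINGTON", "WA"),
  ("WEST VIRGINIA", "WV"), ("WI", "WI"), ("WISCONSIN", "WI"),
  ("WV", "WV"), ("WY", "WY"), ("WYOMING", "WY")]

set_option maxHeartbeats 2000000 in
theorem sp_eq : sortedPairs = LSORT := by decide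


theorem chle (c d : Char) : (c ≤ d) ↔ c.toNat ≤ d.toNat := ge_iff_le

theorem upperChar_lowerChar (c : Char) :
    PySem.Chars.upperChar (PySem.Chars.lowerChar c) = PySem.Chars.upperChar c := by
  by_cases h : 'A' ≤ c ∧ c ≤ 'Z'
  · have h65 : 65 ≤ c.toNat := (chle _ _).mp h.1
    have h90 : c.toNat ≤ 90 := (chle _ _).mp h.2
    have hX : (Char.ofNat (c.toNat + 32)).toNat = c.toNat + 32 := by
      rw [Char.toNat_ofNat, if_pos]; exact Or.inl (by omega)
    have hlow : PySem.Chars.lowerChar c = Char.ofNat (c.toNat + 32) := by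
      simp [PySem.Chars.lowerChar, PySem.Chars.isupper, h.1, h.2]
    have hup : PySem.Chars.upperChar c = c := by
      simp [PySem.Chars.upperChar, PySem.Chars.islower, chle]
      intro h97; omega
    rw [hlow, hup, PySem.Chars.upperChar]
    rw [if_pos]
    · rw [hX]
      have : c.toNat + 32 - 32 = c.toNat := by omega
      rw [this, Char.ofNat_toNat]
    · simp [PySem.Chars.islower, chle, hX]; omega
  · have hlow : PySem.Chars.lowerChar c = c := by
      simp only [PySem.Chars.lowerChar, PySem.Chars.isupper]
      rw [if_neg]; simp only [Bool.and_eq_true, decide_eq_true_eq]; exact h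
    rw [hlow]

theorem upperChar_upperChar (c : Char) :
    PySem.Chars.upperChar (PySem.Chars.upperChar c) = PySem.Chars.upperChar c := by
  by_cases h : 'a' ≤ c ∧ c ≤ 'z'
  · have h97 : 97 ≤ c.toNat := (chle _ _).mp h.1
    have h122 : c.toNat ≤ 122 := (chle _ _).mp h.2
    have hX : (Char.ofNat (c.toNat - 32)).toNat = c.toNat - 32 := by
      rw [Char.toNat_ofNat, if_pos]; exact Or.inl (by omega)
    have hup : PySem.Chars.upperChar c = Char.ofNat (c.toNat - 32) := by
      simp [PySem.Chars.upperChar, PySem.Chars.islower, h.1, h.2]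
    rw [hup, PySem.Chars.upperChar, if_neg]
    simp only [PySem.Chars.islower, Bool.and_eq_true, decide_eq_true_eq, chle, hX]
    have e1 : 'a'.toNat = 97 := rfl
    have e2 : 'z'.toNat = 122 := rfl
    omega
  · have hup : PySem.Chars.upperChar c = c := by
      simp only [PySem.Chars.upperChar, PySem.Chars.islower]
      rw [if_neg]; simp only [Bool.and_eq_true, decide_eq_true_eq]; exact h
    rw [hup, hup]

theorem upper_pyTitleGo (cs : List Char) (b : Bool) :
    PySem.Chars.upper (pyTitleGo cs b) = PySem.Chars.upper cs := by
  induction cs generalizing b with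
  | nil => rfl
  | cons c rest ih =>
    simp only [pyTitleGo, PySem.Chars.upper, List.map_cons] at *
    refine congrArg₂ _ ?_ (ih _)
    split_ifs with h1 h2
    · exact upperChar_lowerChar c
    · exact upperChar_upperChar c
    · rfl

theorem upper_pyTitle (s : String) :
    PySem.Str.upper (pyTitle s) = PySem.Str.upper s := by
  simp only [PySem.Str.upper, pyTitle, String.toList_ofList, upper_pyTitleGo]

-- any 'some' the search returns comes from an entry of the window: no ordering needed
theorem bsearchGo_some {L : List (String × String)} {key v : String} :
    ∀ n lo hi, bsearchGo L key n lo hi = some v →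
      ∃ i, lo ≤ i ∧ i < hi ∧ L.getD i ("", "") = (key, v) := by
  intro n
  induction n with
  | zero =>
    intro lo hi hb
    exact absurd hb (by simp [bsearchGo])
  | succ m ih =>
    intro lo hi hb
    by_cases h : lo < hi
    · rw [bsearchGo, if_pos h] at hb
      simp only at hb
      split_ifs at hb with h1 h2
      · refine ⟨(lo + hi) / 2, by omega, by omega, ?_⟩
        have := Option.some.inj hb
        cases hp : L.getD ((lo + hi) / 2) ("", "") with
        | mk a b =>
          rw [hp] at h1 this
          simp only at h1 this
          rw [h1, this]
      · obtain ⟨i, hi1, hi2, hi3⟩ := ih lo ((lo + hi) / 2) hb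
        exact ⟨i, hi1, by omega, hi3⟩
      · obtain ⟨i, hi1, hi2, hi3⟩ := ih ((lo + hi) / 2 + 1) hi hb
        exact ⟨i, by omega, hi2, hi3⟩
    · rw [bsearchGo, if_neg h] at hb
      exact absurd hb (by simp)

-- the dict built by ofList, evaluated ONCE: stateTable's keys are distinct, so the
-- 51 inserts append in order and the dict is literally the table
set_option maxRecDepth 100000 in
theorem tbl_eq : STATE_ABBREVIATIONS = PySem.Dict.mk stateTable := by decide

set_option maxRecDepth 100000 in
theorem table_get : ∀ p ∈ stateTable, STATE_ABBREVIATIONS.get? p.1 = some p.2 := by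
  rw [tbl_eq]; decide

set_option maxRecDepth 100000 in
theorem table_keys : STATE_ABBREVIATIONS.keys = stateTable.map Prod.fst := by
  rw [tbl_eq]; decide

set_option maxRecDepth 100000 in
theorem table_values : STATE_ABBREVIATIONS.values = stateTable.map Prod.snd := by
  rw [tbl_eq]; decide

set_option maxRecDepth 100000 in
theorem table_items : STATE_ABBREVIATIONS.items = stateTable := by
  rw [tbl_eq]

set_option maxRecDepth 1000000 in
theorem bs_full : ∀ p ∈ stateTable,
    bsearch sortedPairs (PySem.Str.upper p.1) 0 sortedPairs.length = some p.2 := by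
  rw [sp_eq]; decide

set_option maxRecDepth 1000000 in
theorem bs_abbr : ∀ p ∈ stateTable,
    bsearch sortedPairs p.2 0 sortedPairs.length = some p.2 := by
  rw [sp_eq]; decide

set_option maxRecDepth 1000000 in
theorem sp_keys : ∀ q ∈ sortedPairs,
    (∃ p ∈ stateTable, q.1 = PySem.Str.upper p.1) ∨ q.1 ∈ stateTable.map Prod.snd := by
  rw [sp_eq]; decide

theorem scan_some {L : List (String × String)} {u a : String}
    (h : scanStates L u = some a) : ∃ p ∈ L, PySem.Str.upper p.1 = u ∧ p.2 = a := by
  induction L with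
  | nil => simp [scanStates] at h
  | cons q rest ih =>
    obtain ⟨f, ab⟩ := q
    simp only [scanStates] at h
    split_ifs at h with hf
    · exact ⟨(f, ab), by simp, hf, by simpa using h⟩
    · obtain ⟨p, hp, h1, h2⟩ := ih h
      exact ⟨p, by simp [hp], h1, h2⟩

theorem scan_none {L : List (String × String)} {u : String}
    (h : scanStates L u = none) : ∀ p ∈ L, PySem.Str.upper p.1 ≠ u := by
  induction L with
  | nil => simp
  | cons q rest ih =>
    obtain ⟨f, ab⟩ := q
    simp only [scanStates] at h
    split_ifs at h with hf
    · intro p hp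
      rcases List.mem_cons.mp hp with rfl | hp'
      · exact hf
      · exact ih h p hp'

-- key present nowhere in sortedPairs ⇒ bsearch misses
theorem bsearch_none_of_absent {u : String}
    (h1 : scanStates stateTable u = none)
    (h2 : u ∉ stateTable.map Prod.snd) :
    bsearch sortedPairs u 0 sortedPairs.length = none := by
  cases hb : bsearch sortedPairs u 0 sortedPairs.length with
  | none => rfl
  | some v =>
    rw [bsearch] at hb
    obtain ⟨i, _, hi2, hi3⟩ := bsearchGo_some (sortedPairs.length - 0) 0 sortedPairs.length hb
    have hmem : (u, v) ∈ sortedPairs := by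
      rw [← hi3, List.getD_eq_getElem _ _ hi2]
      exact List.getElem_mem hi2
    rcases sp_keys (u, v) hmem with ⟨p, hp, hq⟩ | hq
    · exact absurd hq.symm (scan_none h1 p hp)
    · exact absurd hq h2

-- A's three staged probes equal B's single binary search on the merged sorted array
theorem us_branch (r : String) :
    (if STATE_ABBREVIATIONS.contains (pyTitle r) then
       (STATE_ABBREVIATIONS.get? (pyTitle r)).getD ""
     else if PySem.Str.upper r ∈ STATE_ABBREVIATIONS.values then PySem.Str.upper r
     else
       match scanStates STATE_ABBREVIATIONS.items (PySem.Str.upper r) with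
       | some abbr => abbr
       | none => PySem.Str.slice (PySem.Str.upper r) none (some 2)) =
    (match bsearch sortedPairs (PySem.Str.upper r) 0 sortedPairs.length with
     | some code => code
     | none => PySem.Str.slice (PySem.Str.upper r) none (some 2)) := by
  by_cases hc : STATE_ABBREVIATIONS.contains (pyTitle r) = true
  · rw [if_pos hc]
    rw [PySem.Dict.contains_eq_decide_mem_keys, table_keys, decide_eq_true_eq] at hc
    obtain ⟨p, hp, hpt⟩ := List.mem_map.mp hc
    have hu : PySem.Str.upper r = PySem.Str.upper p.1 := by rw [← upper_pyTitle r, hpt]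
    rw [← hpt, table_get p hp, hu, bs_full p hp]
    simp only [Option.getD_some]
  · rw [if_neg hc]
    by_cases hv : PySem.Str.upper r ∈ STATE_ABBREVIATIONS.values
    · rw [if_pos hv]
      rw [table_values] at hv
      obtain ⟨p, hp, hps⟩ := List.mem_map.mp hv
      rw [← hps, bs_abbr p hp]
    · rw [if_neg hv]
      rw [table_items, table_values] at *
      cases hscan : scanStates stateTable (PySem.Str.upper r) with
      | some abbr =>
        obtain ⟨p, hp, h1, h2⟩ := scan_some hscan
        rw [← h1, bs_full p hp, h2]
      | none =>
        rw [bsearch_none_of_absent hscan hv]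

-- ===== VERDICT (by name: the statement is the Claim_ definition above) =====
set_option maxHeartbeats 1000000 in
theorem normalize_region_spec : Claim_equal_normalize_region := by
  intro region country_code _dom
  unfold Spec_normalize_region normalize_region normalize_region_alt
  cases region with
  | none => rfl
  | some s =>
    by_cases hs : s = ""
    · simp [hs]
    · simp only [if_neg hs]
      cases hUS : (match country_code with
        | none => false
        | some cc => if cc = "" then false else decide (PySem.Str.upper cc = "US")) with
      | false => simp
      | true => simpa [hUS] using us_branch (PySem.Str.strip s)
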